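-- pv_equiv track=rewrite | github.com/ridwanpratama/3-Dimensi | app.py | calculate_memory_address
-- ===== SOURCE A (Python) =====
-- def calculate_memory_address(base_address, shape, indices, element_size):
--     address = base_address
--     for i, dim_size in enumerate(shape):
--         stride = 1
--         for j in range(i + 1, len(shape)):
--             stride *= shape[j]
--         address += (indices[i] - 1) * stride
--     return address * element_size
-- ===== SOURCE B (Python) =====
-- def calculate_memory_address(base_address, shape, indices, element_size):
--     offset = 0
--     stride = 1
--     for dim, idx in zip(reversed(shape), reversed(indices[:len(shape)])):
--         offset += (idx - 1) * stride
--         stride *= dim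
--     return (base_address + offset) * element_size
-- ===== Notes on version B (the rewrite author's own statement) =====
-- stated objective: faster
-- what changed: Replaces the nested loop that recomputes each stride as a fresh product with a single backward pass that maintains a running stride (suffix product) while accumulating the offset.
import Mathlib
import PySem

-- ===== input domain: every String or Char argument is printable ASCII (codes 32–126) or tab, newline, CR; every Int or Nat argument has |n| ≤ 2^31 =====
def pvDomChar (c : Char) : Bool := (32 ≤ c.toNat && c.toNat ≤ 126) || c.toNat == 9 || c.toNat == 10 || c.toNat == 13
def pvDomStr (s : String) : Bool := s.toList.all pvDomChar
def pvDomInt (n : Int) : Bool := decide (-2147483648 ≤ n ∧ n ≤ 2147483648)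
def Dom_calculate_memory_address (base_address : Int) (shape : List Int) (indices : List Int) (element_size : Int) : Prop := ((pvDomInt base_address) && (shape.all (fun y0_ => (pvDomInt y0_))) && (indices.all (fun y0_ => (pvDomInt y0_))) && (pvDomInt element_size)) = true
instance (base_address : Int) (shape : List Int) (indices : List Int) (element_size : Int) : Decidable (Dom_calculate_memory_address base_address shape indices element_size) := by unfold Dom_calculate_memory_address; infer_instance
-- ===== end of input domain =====

-- B replaces A's O(n^2) nested stride recomputation by one backward pass with a
-- running stride (suffix product); return value only, no side effects.

-- ===== PORT A =====
def calculate_memory_address (base_address : Int) (shape : List Int) (indices : List Int) (element_size : Int) : Int :=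
  let address :=
    (PySem.List.enumerate shape 0).foldl
      (fun address p =>
        let stride :=
          (PySem.List.pyRange (p.1 + 1) (shape.length : Int) 1).foldl
            (fun stride j => stride * PySem.List.pyGetD shape j 0) 1
        address + (PySem.List.pyGetD indices p.1 0 - 1) * stride)
      base_address
  address * element_size

-- ===== PORT B =====
-- indices[:len(shape)] has a nonnegative stop, so it is List.take (exact here)
def calculate_memory_address_alt (base_address : Int) (shape : List Int) (indices : List Int) (element_size : Int) : Int :=
  let r :=
    (shape.reverse.zip (indices.take shape.length).reverse).foldl
      (fun st p => (st.1 + (p.2 - 1) * st.2, st.2 * p.1)) ((0 : Int), (1 : Int))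
  (base_address + r.1) * element_size

-- ===== PRECONDITION & SPEC =====
-- Pre_ excludes exactly the inputs where A raises IndexError: shape longer than indices.
def Pre_calculate_memory_address (base_address : Int) (shape : List Int) (indices : List Int) (element_size : Int) : Prop :=
  shape.length ≤ indices.length
instance (base_address : Int) (shape : List Int) (indices : List Int) (element_size : Int) : Decidable (Pre_calculate_memory_address base_address shape indices element_size) := by unfold Pre_calculate_memory_address; infer_instance

def pvWitness_calculate_memory_address : Int × List Int × List Int × Int := (100, [2, 3, 4], [1, 2, 3], 4)

def Spec_calculate_memory_address (base_address : Int) (shape : List Int) (indices : List Int) (element_size : Int) (out : Int) : Prop := out = calculate_memory_address_alt base_address shape indices element_size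
instance (base_address : Int) (shape : List Int) (indices : List Int) (element_size : Int) (out : Int) : Decidable (Spec_calculate_memory_address base_address shape indices element_size out) := by unfold Spec_calculate_memory_address; infer_instance

-- ===== CLAIM (what is proved, stated in full; the proofs are below) =====
def Claim_equal_calculate_memory_address : Prop := ∀ (base_address : Int) (shape : List Int) (indices : List Int) (element_size : Int), Dom_calculate_memory_address base_address shape indices element_size → Pre_calculate_memory_address base_address shape indices element_size → Spec_calculate_memory_address base_address shape indices element_size (calculate_memory_address base_address shape indices element_size)

-- ===== LEMMAS AND PROOFS =====

-- Mathematical offset: sum over positions of (index - 1) * (product of later dims).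
def pvS : List Int → List Int → Int
  | [], _ => 0
  | _ :: _, [] => 0
  | _ :: ds, x :: xs => (x - 1) * ds.prod + pvS ds xs

theorem pvS_take (ds xs : List Int) : pvS ds (xs.take ds.length) = pvS ds xs := by
  induction ds generalizing xs with
  | nil => rfl
  | cons d ds ih =>
    cases xs with
    | nil => rfl
    | cons x xs => simp [pvS, ih]

theorem pv_foldl_mul (l : List Int) (a : Int) : l.foldl (· * ·) a = a * l.prod := by
  induction l generalizing a with
  | nil => simp
  | cons x l ih => simp [List.foldl_cons, ih, mul_assoc]

-- A's outer loop from position k; the inner loop is the suffix product.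
theorem pvA_loop (shape indices : List Int) (hlen : shape.length ≤ indices.length) :
    ∀ (rest : List Int) (k : Nat) (addr : Int), shape.drop k = rest →
      (PySem.List.enumerate rest (k : Int)).foldl
        (fun address p =>
          address + (PySem.List.pyGetD indices p.1 0 - 1) *
            ((PySem.List.pyRange (p.1 + 1) (shape.length : Int) 1).foldl
              (fun stride j => stride * PySem.List.pyGetD shape j 0) 1))
        addr
      = addr + pvS rest (indices.drop k) := by
  intro rest
  induction rest with
  | nil => intro k addr h; simp [PySem.List.enumerate, pvS]
  | cons d rest ih =>
    intro k addr h
    have hk : k < shape.length := by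
      by_contra hk
      simp [List.drop_eq_nil_of_le (Nat.le_of_not_lt hk)] at h
    have hdrop : shape.drop (k + 1) = rest := by
      have := congrArg List.tail h
      simpa [List.tail_drop] using this
    have hki : k < indices.length := lt_of_lt_of_le hk hlen
    rw [PySem.List.enumerate_cons, List.foldl_cons]
    have hstride :
        (PySem.List.pyRange ((k : Int) + 1) (shape.length : Int) 1).foldl
          (fun stride j => stride * PySem.List.pyGetD shape j 0) 1 = rest.prod := by
      have h0 : (0 : Int) ≤ (k : Int) + 1 := by positivity
      rw [show ((k : Int) + 1) = (((k + 1 : Nat) : Int)) by push_cast; ring]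
      rw [PySem.List.foldl_pyRange_pyGetD' shape 0 (fun s v => s * v) 1 (by positivity)]
      simp [hdrop, pv_foldl_mul]
    have hidx : PySem.List.pyGetD indices (k : Int) 0 = indices[k] := by
      simp [PySem.List.pyGetD_natCast, List.getElem?_eq_getElem hki]
    have hdropIdx : indices.drop k = indices[k] :: indices.drop (k + 1) :=
      List.drop_eq_getElem_cons hki
    rw [hstride, hidx,
      show ((k : Int) + 1) = (((k + 1 : Nat) : Int)) by push_cast; ring,
      ih (k + 1) _ hdrop, hdropIdx]
    simp [pvS]; ring

theorem pvA_eq (base_address : Int) (shape indices : List Int) (element_size : Int)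
    (hlen : shape.length ≤ indices.length) :
    calculate_memory_address base_address shape indices element_size
      = (base_address + pvS shape indices) * element_size := by
  have h := pvA_loop shape indices hlen shape 0 base_address rfl
  push_cast at h
  unfold calculate_memory_address
  dsimp only
  rw [h]
  simp

-- B's backward pass: folding over the reversed zipped lists from state (o, s)
-- yields (o + s * pvS ds xs, s * prod ds).
theorem pvB_loop (ds : List Int) : ∀ (xs : List Int), ds.length = xs.length → ∀ (o s : Int),
    (ds.reverse.zip xs.reverse).foldl
      (fun st p => (st.1 + (p.2 - 1) * st.2, st.2 * p.1)) (o, s)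
    = (o + s * pvS ds xs, s * ds.prod) := by
  induction ds with
  | nil =>
    intro xs h o s
    have : xs = [] := List.eq_nil_of_length_eq_zero h.symm
    simp [this, pvS]
  | cons d ds ih =>
    intro xs h o s
    cases xs with
    | nil => simp at h
    | cons x xs =>
      have hl : ds.length = xs.length := by simpa using h
      rw [List.reverse_cons, List.reverse_cons,
        List.zip_append (by simp [hl]), List.foldl_append, ih xs hl o s]
      simp [pvS]
      constructor <;> ring

theorem pvB_eq (base_address : Int) (shape indices : List Int) (element_size : Int)
    (hlen : shape.length ≤ indices.length) :
    calculate_memory_address_alt base_address shape indices element_size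
      = (base_address + pvS shape indices) * element_size := by
  unfold calculate_memory_address_alt
  have htake : shape.length = (indices.take shape.length).length := by
    simp [List.length_take, Nat.min_eq_left hlen]
  rw [pvB_loop shape (indices.take shape.length) htake 0 1]
  simp [pvS_take]

-- ===== VERDICT (by name: the statement is the Claim_ definition above) =====
theorem calculate_memory_address_spec : Claim_equal_calculate_memory_address := by
  intro base_address shape indices element_size _ hpre
  unfold Spec_calculate_memory_address
  rw [pvA_eq _ _ _ _ hpre, pvB_eq _ _ _ _ hpre]
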